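-- pv_equiv track=rewrite | github.com/obadahmh/ontological-cbm | concept_extraction/concepts/ner.py | _negation_tool
-- ===== SOURCE A (Python) =====
-- def _negation_tool(note: str) -> str:
--     words = note.lower().split()
--     absence = {"no", "not", "none", "without", "absent"}
--     uncertain = {"maybe", "possible", "unclear", "could", "might", "suspect"}
--     if any(word in uncertain for word in words):
--         return "uncertain"
--     if any(word in absence for word in words):
--         return "absent"
--     return "present"
-- ===== SOURCE B (Python) =====
-- def _negation_tool(note: str) -> str:
--     absence = {"no", "not", "none", "without", "absent"}
--     uncertain = {"maybe", "possible", "unclear", "could", "might", "suspect"}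
--     found_absence = False
--     for word in note.lower().split():
--         if word in uncertain:
--             return "uncertain"
--         if word in absence:
--             found_absence = True
--     return "absent" if found_absence else "present"
-- ===== Notes on version B (the rewrite author's own statement) =====
-- stated objective: alternative
-- what changed: Replaced A's two sequential any-scans over the word list by a single pass that returns early on an uncertainty keyword and tracks a boolean flag for absence keywords, deciding the final label after the loop.
import Mathlib
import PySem

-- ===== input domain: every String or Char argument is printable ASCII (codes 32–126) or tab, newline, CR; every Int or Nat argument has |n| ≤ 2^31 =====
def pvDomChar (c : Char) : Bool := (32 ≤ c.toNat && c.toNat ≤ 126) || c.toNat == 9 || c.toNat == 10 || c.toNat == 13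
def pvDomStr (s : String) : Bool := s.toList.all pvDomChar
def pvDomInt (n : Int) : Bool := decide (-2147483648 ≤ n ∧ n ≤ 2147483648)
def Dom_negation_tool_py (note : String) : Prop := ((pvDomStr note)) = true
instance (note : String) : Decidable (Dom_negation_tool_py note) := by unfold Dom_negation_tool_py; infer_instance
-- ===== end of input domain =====

-- B replaces A's two sequential any-scans by one pass with a boolean absence flag (alternative decomposition, same cost).


-- ===== PORT A =====
def pvAbsence : List String := ["no", "not", "none", "without", "absent"]
def pvUncertain : List String := ["maybe", "possible", "unclear", "could", "might", "suspect"]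

def negation_tool_py (note : String) : String :=
  let words := PySem.Str.split₀ (PySem.Str.lower note)
  if words.any (fun w => pvUncertain.contains w) then "uncertain"
  else if words.any (fun w => pvAbsence.contains w) then "absent"
  else "present"

-- ===== PORT B =====
-- the single-pass loop of Source B: early return on uncertain, flag for absence
def pvLoop : List String → Bool → String
  | [], foundAbsence => if foundAbsence then "absent" else "present"
  | w :: ws, foundAbsence =>
      if pvUncertain.contains w then "uncertain"
      else pvLoop ws (foundAbsence || pvAbsence.contains w)

def negation_tool_py_alt (note : String) : String :=
  pvLoop (PySem.Str.split₀ (PySem.Str.lower note)) false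

-- ===== PRECONDITION & SPEC =====
def Spec_negation_tool_py (note : String) (out : String) : Prop := out = negation_tool_py_alt note
instance (note : String) (out : String) : Decidable (Spec_negation_tool_py note out) := by unfold Spec_negation_tool_py; infer_instance

-- ===== CLAIM (what is proved, stated in full; the proofs are below) =====
def Claim_equal_negation_tool_py : Prop := ∀ (note : String), Dom_negation_tool_py note → Spec_negation_tool_py note (negation_tool_py note)

-- ===== LEMMAS AND PROOFS =====
theorem pvLoop_char (ws : List String) (f : Bool) :
    pvLoop ws f =
      if ws.any (fun w => pvUncertain.contains w) then "uncertain"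
      else if f || ws.any (fun w => pvAbsence.contains w) then "absent" else "present" := by
  induction ws generalizing f with
  | nil => simp [pvLoop]
  | cons w ws ih =>
      by_cases hu : w ∈ pvUncertain
      · simp [pvLoop, hu]
      · by_cases ha : w ∈ pvAbsence <;>
          simp [pvLoop, hu, ha, ih]

-- ===== VERDICT (by name: the statement is the Claim_ definition above) =====
theorem negation_tool_py_spec : Claim_equal_negation_tool_py := by
  intro note _
  unfold Spec_negation_tool_py negation_tool_py negation_tool_py_alt
  rw [pvLoop_char]
  simp
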